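-- pv_equiv track=rewrite | github.com/mkssri/hobbies | cs/competitive_programming/leetcode_fulltimes/2023/januarary/40_combination_sum_2.py | combinationSum2
-- ===== SOURCE A (Python) =====
-- from typing import List
--
-- def combinationSum2(candidates: List[int], target: int) -> List[List[int]]:
--
--     candidates.sort()
--     res = []
--     l=len(candidates)
--
--     def dfs(pos, cur, target ):
--         if target==0:
--             res.append(cur.copy())
--         if target<=0:
--             return
--         prev=-1
--         for i in range(pos,l):
--             if candidates[i]==prev:
--                 continue
--             cur.append(candidates[i])
--             dfs(i+1, cur, target-candidates[i])
--             cur.pop()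
--
--             prev=candidates[i]
--
--     dfs(0,[], target)
--     return res
-- ===== SOURCE B (Python) =====
-- def combinationSum2(candidates, target):
--     candidates.sort()
--     pairs = _group(candidates)
--     res = []
--
--     def rec(ps, rem, cur):
--         if rem == 0:
--             res.append(cur)
--             return
--         if rem < 0 or not ps:
--             return
--         (v, m), rest = ps[0], ps[1:]
--         for k in range(m, -1, -1):
--             rec(rest, rem - k * v, cur + [v] * k)
--
--     rec(pairs, target, [])
--     return res
--
--
-- def _group(xs):
--     if not xs:
--         return []
--     v, rest = xs[0], xs[1:]
--     g = _group(rest)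
--     if g and g[0][0] == v:
--         return [(v, g[0][1] + 1)] + g[1:]
--     return [(v, 1)] + g
-- ===== Notes on version B (the rewrite author's own statement) =====
-- stated objective: alternative
-- what changed: B replaces A's index-based DFS over the sorted array with duplicate-skipping via a prev sentinel by first run-length-grouping the sorted list into distinct (value,count) pairs and recursing over that pair list, choosing a copy-count k from count down to 0 at each distinct value and building combinations by list concatenation instead of append/pop backtracking.
-- outside the precondition, e.g. on combinationSum2([-1, 3], 2): A returns [], B returns [[-1, 3]]
import Mathlib
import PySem

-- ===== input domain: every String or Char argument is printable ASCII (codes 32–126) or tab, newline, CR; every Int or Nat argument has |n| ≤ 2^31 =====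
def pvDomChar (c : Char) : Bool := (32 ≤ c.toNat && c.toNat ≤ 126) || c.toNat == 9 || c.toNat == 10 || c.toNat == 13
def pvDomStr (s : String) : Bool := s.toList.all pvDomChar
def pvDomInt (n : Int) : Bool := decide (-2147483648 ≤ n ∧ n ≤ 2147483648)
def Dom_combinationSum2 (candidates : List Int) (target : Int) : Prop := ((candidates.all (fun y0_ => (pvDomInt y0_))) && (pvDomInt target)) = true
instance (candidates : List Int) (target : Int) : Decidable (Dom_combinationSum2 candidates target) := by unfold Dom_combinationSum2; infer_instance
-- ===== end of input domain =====

-- B builds ascending (value,count) run-length pairs from the sorted candidates and recurses over them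
-- with a descending copy-count per distinct value, instead of A's index DFS with a prev-sentinel skip;
-- objective: alternative. Both A and B sort `candidates` in place; the equivalence is about the return value.


-- ===== PORT A =====
-- dfs(pos, cur, target) of A and its `for i in range(pos, l)` loop (loop variable i, duplicate guard
-- `prev`), with res threaded as an accumulator. Python's recursion terminates because pos strictly
-- increases; `fuel` (≥ 2*(l-pos)+1 at every call, 2*l+1 at the top) is only a structural totality
-- guard for that argument and is never exhausted on the calls the program makes.
mutual
def pvDfsA (cs : List Int) (l : Nat) : Nat → Nat → List Int → Int → List (List Int) → List (List Int)
  | 0, _, _, _, res => res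
  | fuel + 1, pos, cur, target, res =>
    let res1 := if target == 0 then res ++ [cur] else res
    if target ≤ 0 then res1
    else pvLoopA cs l fuel (-1) cur target res1 pos

def pvLoopA (cs : List Int) (l : Nat) : Nat → Int → List Int → Int → List (List Int) → Nat → List (List Int)
  | 0, _, _, _, res, _ => res
  | fuel + 1, prev, cur, target, res, i =>
    if i < l then
      let v := cs.getD i 0
      if v == prev then pvLoopA cs l fuel prev cur target res (i + 1)
      else pvLoopA cs l fuel v cur target (pvDfsA cs l fuel (i + 1) (cur ++ [v]) (target - v) res) (i + 1)
    else res
end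

def combinationSum2 (candidates : List Int) (target : Int) : List (List Int) :=
  let sorted := PySem.List.sorted candidates (fun x => x) false   -- candidates.sort()
  pvDfsA sorted sorted.length (2 * sorted.length + 1) 0 [] target []   -- dfs(0, [], target); return res

-- ===== PORT B =====
-- _group(xs): run-length pairs of adjacent equal values
def pvGroupB : List Int → List (Int × Nat)
  | [] => []
  | v :: rest =>
    match pvGroupB rest with
    | (w, c) :: g => if w == v then (v, c + 1) :: g else (v, 1) :: (w, c) :: g
    | [] => [(v, 1)]

-- the `for k in range(m, -1, -1)` loop of rec; f is the recursive call into the next pair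
def pvKloopB (f : Int → List Int → List (List Int) → List (List Int)) (v rem : Int)
    (cur : List Int) : Nat → List (List Int) → List (List Int)
  | k, res =>
    let res1 := f (rem - (k : Int) * v) (cur ++ List.replicate k v) res
    match k with
    | 0 => res1
    | k' + 1 => pvKloopB f v rem cur k' res1

-- rec(ps, rem, cur) of B, with res threaded as an accumulator
def pvRecB (ps : List (Int × Nat)) (rem : Int) (cur : List Int)
    (res : List (List Int)) : List (List Int) :=
  if rem == 0 then res ++ [cur]
  else if rem < 0 then res
  else match ps with
    | [] => res
    | (v, m) :: rest => pvKloopB (fun r c a => pvRecB rest r c a) v rem cur m res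
  termination_by ps.length

def combinationSum2_alt (candidates : List Int) (target : Int) : List (List Int) :=
  let sorted := PySem.List.sorted candidates (fun x => x) false   -- candidates.sort()
  pvRecB (pvGroupB sorted) target [] []

-- ===== PRECONDITION & SPEC =====
-- Pre_ restricts to the task's natural domain (non-negative candidate values, as in the original
-- problem's constraints): on lists with negative values A's `prev = -1` sentinel accidentally skips
-- the candidate value -1 (e.g. A([-1,3],2) = [] while B finds [[-1,3]]), and A's target<=0 pruning
-- silently drops combinations whose partial sums pass through 0.
def Pre_combinationSum2 (candidates : List Int) (target : Int) : Prop :=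
  ∀ x ∈ candidates, 0 ≤ x
instance (candidates : List Int) (target : Int) : Decidable (Pre_combinationSum2 candidates target) := by
  unfold Pre_combinationSum2; infer_instance

def pvWitness_combinationSum2 : List Int × Int := ([2, 3, 2, 5], 7)

def Spec_combinationSum2 (candidates : List Int) (target : Int) (out : List (List Int)) : Prop :=
  out = combinationSum2_alt candidates target
instance (candidates : List Int) (target : Int) (out : List (List Int)) : Decidable (Spec_combinationSum2 candidates target out) := by
  unfold Spec_combinationSum2; infer_instance

-- ===== CLAIM (what is proved, stated in full; the proofs are below) =====
def Claim_equal_combinationSum2 : Prop := ∀ (candidates : List Int) (target : Int), Dom_combinationSum2 candidates target → Pre_combinationSum2 candidates target → Spec_combinationSum2 candidates target (combinationSum2 candidates target)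

-- ===== LEMMAS AND PROOFS =====

-- de-indexed (suffix-list) version of A's dfs/loop, used only by the proofs
mutual
def pvDfsS (xs : List Int) (cur : List Int) (t : Int) (res : List (List Int)) : List (List Int) :=
  let res1 := if t == 0 then res ++ [cur] else res
  if t ≤ 0 then res1 else pvLoopS xs (-1) cur t res1
  termination_by (xs.length, 1)

def pvLoopS (xs : List Int) (prev : Int) (cur : List Int) (t : Int)
    (res : List (List Int)) : List (List Int) :=
  match xs with
  | [] => res
  | x :: rest =>
    if x == prev then pvLoopS rest prev cur t res
    else pvLoopS rest x cur t (pvDfsS rest (cur ++ [x]) (t - x) res)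
  termination_by (xs.length, 0)
end

-- body of pvRecB once the rem checks have passed
def pvRecBody (ps : List (Int × Nat)) (t : Int) (cur : List Int)
    (res : List (List Int)) : List (List Int) :=
  match ps with
  | [] => res
  | (v, m) :: rest => pvKloopB (fun r c a => pvRecB rest r c a) v t cur m res

-- the chain of recB calls performed by pvKloopB for k = c+j, c+j-1, …, c
def pvChain (g : List (Int × Nat)) (v t : Int) (cur : List Int) (c : Nat) :
    Nat → List (List Int) → List (List Int)
  | 0, res => pvRecB g (t - (c : Int) * v) (cur ++ List.replicate c v) res
  | j + 1, res =>
      pvChain g v t cur c j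
        (pvRecB g (t - ((c + j + 1 : Nat) : Int) * v) (cur ++ List.replicate (c + j + 1) v) res)

lemma chain_zero (g : List (Int × Nat)) (v t : Int) (cur : List Int) (c : Nat) (res : List (List Int)) :
    pvChain g v t cur c 0 res = pvRecB g (t - (c : Int) * v) (cur ++ List.replicate c v) res := rfl

lemma chain_succ (g : List (Int × Nat)) (v t : Int) (cur : List Int) (c j : Nat) (res : List (List Int)) :
    pvChain g v t cur c (j + 1) res
      = pvChain g v t cur c j
          (pvRecB g (t - ((c + j + 1 : Nat) : Int) * v) (cur ++ List.replicate (c + j + 1) v) res) := rfl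

lemma kloop_succ (f : Int → List Int → List (List Int) → List (List Int)) (v t : Int) (cur : List Int) (k : Nat) (res : List (List Int)) :
    pvKloopB f v t cur (k + 1) res
      = pvKloopB f v t cur k
          (f (t - ((k + 1 : Nat) : Int) * v) (cur ++ List.replicate (k + 1) v) res) := rfl

lemma kloop_zero (f : Int → List Int → List (List Int) → List (List Int)) (v t : Int) (cur : List Int) (res : List (List Int)) :
    pvKloopB f v t cur 0 res = f (t - (0 : Int) * v) (cur ++ List.replicate 0 v) res := by
  rw [pvKloopB]; norm_num

lemma recB_pos {ps : List (Int × Nat)} {t : Int} {cur : List Int} {res : List (List Int)}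
    (ht : 0 < t) : pvRecB ps t cur res = pvRecBody ps t cur res := by
  rw [pvRecB.eq_def]
  have h0 : (t == 0) = false := by simp; omega
  have h1 : ¬ t < 0 := by omega
  cases ps with
  | nil => simp [h0, h1, pvRecBody]
  | cons p rest => cases p; simp [h0, h1, pvRecBody]

lemma kloop_eq_chain (g : List (Int × Nat)) (v t : Int) (cur : List Int) :
    ∀ j res, pvKloopB (fun r c a => pvRecB g r c a) v t cur j res = pvChain g v t cur 0 j res := by
  intro j
  induction j with
  | zero => intro res; rw [kloop_zero, chain_zero]; norm_num
  | succ j ih =>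
      intro res
      rw [kloop_succ, chain_succ, ih, show 0 + j + 1 = j + 1 from by omega]

lemma chain_peel (g : List (Int × Nat)) (v t : Int) (cur : List Int) :
    ∀ j c res, pvChain g v t cur c (j + 1) res
      = pvRecB g (t - (c : Int) * v) (cur ++ List.replicate c v) (pvChain g v t cur (c + 1) j res) := by
  intro j
  induction j with
  | zero =>
      intro c res
      rw [chain_succ, chain_zero, chain_zero, show c + 0 + 1 = c + 1 from by omega]
  | succ j ih =>
      intro c res
      rw [chain_succ, ih]
      rw [show c + (j + 1) + 1 = c + 1 + j + 1 from by omega]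
      rw [chain_succ]

lemma chain_of_neg (g : List (Int × Nat)) (v t : Int) (cur : List Int)
    {c : Nat} (hneg : t - (c : Int) * v < 0) (hv : 0 ≤ v) :
    ∀ j res, pvChain g v t cur c j res = res := by
  have hrec : ∀ (k : Nat) res, (c : Int) ≤ (k : Int) → pvRecB g (t - (k : Int) * v) (cur ++ List.replicate k v) res = res := by
    intro k res hk
    have hlt : t - (k : Int) * v < 0 := by nlinarith
    rw [pvRecB.eq_def, if_neg (by simp; omega), if_pos hlt]
  intro j
  induction j with
  | zero => intro res; rw [chain_zero]; exact hrec c res le_rfl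
  | succ j ih =>
      intro res
      rw [chain_succ, hrec (c + j + 1) res (by push_cast; omega), ih]

lemma group_cons : ∀ (xs : List Int) (v : Int),
    pvGroupB (v :: xs)
      = (v, (xs.takeWhile (· == v)).length + 1) :: pvGroupB (xs.dropWhile (· == v)) := by
  intro xs
  induction xs with
  | nil => intro v; simp [pvGroupB]
  | cons x rest ih =>
      intro v
      by_cases hx : x = v
      · subst hx
        have h1 : pvGroupB (x :: x :: rest)
            = (x, (rest.takeWhile (· == x)).length + 1 + 1) :: pvGroupB (rest.dropWhile (· == x)) := by
          show (match pvGroupB (x :: rest) with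
            | (w, c) :: g => if w == x then (x, c + 1) :: g else (x, 1) :: (w, c) :: g
            | [] => [(x, 1)]) = _
          rw [ih x]
          simp
        rw [h1]
        simp
      · have hbx : (x == v) = false := by simp [hx]
        have h1 : pvGroupB (v :: x :: rest) = (v, 1) :: pvGroupB (x :: rest) := by
          show (match pvGroupB (x :: rest) with
            | (w, c) :: g => if w == v then (v, c + 1) :: g else (v, 1) :: (w, c) :: g
            | [] => [(v, 1)]) = _
          rw [ih x]
          simp [hbx]
        rw [h1]
        simp [hbx]

lemma takeWhile_eq_replicate (v : Int) (xs : List Int) :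
    xs.takeWhile (· == v) = List.replicate (xs.takeWhile (· == v)).length v := by
  apply List.eq_replicate_of_mem
  intro b hb
  have := List.mem_takeWhile_imp hb
  simpa using this

lemma lt_of_mem_dropWhile (v : Int) : ∀ (xs : List Int), List.Pairwise (· ≤ ·) xs →
    (∀ y ∈ xs, v ≤ y) → ∀ y ∈ xs.dropWhile (· == v), v < y := by
  intro xs
  induction xs with
  | nil => intro _ _ y hy; simp at hy
  | cons x rest ih =>
      intro hp hle y hy
      by_cases hx : x = v
      · subst hx
        rw [List.dropWhile_cons_of_pos (by simp)] at hy
        exact ih hp.of_cons (fun z hz => hle z (by simp [hz])) y hy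
      · rw [List.dropWhile_cons_of_neg (by simp [hx])] at hy
        have hvx : v < x := lt_of_le_of_ne (hle x (by simp)) (fun h => hx h.symm)
        rcases List.mem_cons.1 hy with rfl | hy
        · exact hvx
        · exact lt_of_lt_of_le hvx ((List.pairwise_cons.1 hp).1 y hy)

lemma loopS_skip (v : Int) (cur : List Int) (t : Int) :
    ∀ (r : Nat) (ws : List Int) (res : List (List Int)),
      pvLoopS (List.replicate r v ++ ws) v cur t res = pvLoopS ws v cur t res := by
  intro r
  induction r with
  | zero => intro ws res; simp
  | succ r ih =>
      intro ws res
      rw [List.replicate_succ, List.cons_append, pvLoopS]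
      simp only [BEq.rfl, if_true]
      exact ih ws res

-- the two statements proved by the joint strong induction
def pvStB (xs : List Int) : Prop :=
  ∀ prev cur t res, (∀ y ∈ xs, prev < y) → 0 < t →
    pvLoopS xs prev cur t res = pvRecBody (pvGroupB xs) t cur res

def pvStA (xs : List Int) : Prop :=
  ∀ cur t res, pvDfsS xs cur t res = pvRecB (pvGroupB xs) t cur res

-- one taken value v, j further copies of v available before ws: A's nested dfs equals the chain
lemma dfs_run_eq_chain (v : Int) (ws : List Int) (t : Int) (cur : List Int)
    (hA : pvStA ws) (hB : pvStB ws) (hv : 0 ≤ v) (hws : ∀ y ∈ ws, v < y) (ht : 0 < t) :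
    ∀ j c res, pvDfsS (List.replicate j v ++ ws) (cur ++ List.replicate c v) (t - (c : Int) * v) res
      = pvChain (pvGroupB ws) v t cur c j res := by
  intro j
  induction j with
  | zero =>
      intro c res
      rw [chain_zero]
      simpa using hA (cur ++ List.replicate c v) (t - (c : Int) * v) res
  | succ j ih =>
      intro c res
      rcases lt_trichotomy (t - (c : Int) * v) 0 with hneg | h0 | hpos
      · -- rem already negative: both sides are res
        rw [pvDfsS]
        simp only [show ((t - (c : Int) * v) == 0) = false from by simp; omega,
          Bool.false_eq_true, if_false, if_pos (le_of_lt hneg)]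
        rw [chain_of_neg _ v t cur hneg hv]
      · -- rem hits exactly 0: A appends and stops; in the chain only the k = c call fires
        have hvpos : 0 < v := by
          rcases hv.lt_or_eq with h | h
          · exact h
          · exfalso; rw [← h] at h0; simp at h0; omega
        rw [pvDfsS]
        simp only [show ((t - (c : Int) * v) == 0) = true from by simp; omega,
          if_true, if_pos (le_of_eq h0)]
        rw [chain_peel]
        rw [chain_of_neg _ v t cur (c := c + 1) (by push_cast; nlinarith) hv]
        rw [pvRecB.eq_def]
        simp only [show ((t - (c : Int) * v) == 0) = true from by simp; omega, if_true]
      · -- rem still positive: take one more copy of v and recurse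
        rw [pvDfsS]
        simp only [show ((t - (c : Int) * v) == 0) = false from by simp; omega,
          Bool.false_eq_true, if_false, if_neg (not_le.mpr hpos)]
        rw [List.replicate_succ, List.cons_append, pvLoopS]
        simp only [show (v == (-1 : Int)) = false from by simp; omega, Bool.false_eq_true, if_false]
        have e1 : (cur ++ List.replicate c v) ++ [v] = cur ++ List.replicate (c + 1) v := by
          rw [List.append_assoc, ← List.replicate_succ']
        have e2 : t - (c : Int) * v - v = t - ((c + 1 : Nat) : Int) * v := by push_cast; ring
        rw [e1, e2, ih (c + 1)]
        rw [loopS_skip]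
        rw [hB v (cur ++ List.replicate c v) (t - (c : Int) * v) _ hws hpos]
        rw [chain_peel]
        rw [recB_pos hpos]


lemma StA_of_StB (xs : List Int) (hnn : ∀ y ∈ xs, 0 ≤ y) (hb : pvStB xs) : pvStA xs := by
  intro cur t res
  rcases lt_trichotomy t 0 with hneg | h0 | hpos
  · rw [pvDfsS, pvRecB.eq_def]
    simp only [show (t == 0) = false from by simp; omega, Bool.false_eq_true, if_false,
      if_pos (le_of_lt hneg), if_pos hneg]
  · subst h0
    rw [pvDfsS, pvRecB.eq_def]
    simp
  · rw [pvDfsS]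
    simp only [show (t == 0) = false from by simp; omega, Bool.false_eq_true, if_false,
      if_neg (not_le.mpr hpos)]
    rw [hb (-1) cur t res (fun y hy => by have := hnn y hy; omega) hpos]
    rw [recB_pos hpos]

lemma main_induction : ∀ (n : Nat) (xs : List Int), xs.length ≤ n →
    List.Pairwise (· ≤ ·) xs → (∀ y ∈ xs, 0 ≤ y) → pvStB xs ∧ pvStA xs := by
  intro n
  induction n with
  | zero =>
      intro xs hlen hp hnn
      have hxs : xs = [] := List.eq_nil_of_length_eq_zero (Nat.le_zero.mp hlen)
      subst hxs
      have hb : pvStB [] := by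
        intro prev cur t res _ ht
        rw [pvLoopS]
        simp [pvGroupB, pvRecBody]
      exact ⟨hb, StA_of_StB [] hnn hb⟩
  | succ n ihn =>
      intro xs hlen hp hnn
      cases xs with
      | nil =>
          have hb : pvStB [] := by
            intro prev cur t res _ ht
            rw [pvLoopS]
            simp [pvGroupB, pvRecBody]
          exact ⟨hb, StA_of_StB [] hnn hb⟩
      | cons v tail =>
          have hnn' : ∀ y ∈ tail, 0 ≤ y := fun y hy => hnn y (by simp [hy])
          have hvtail : ∀ y ∈ tail, v ≤ y := (List.pairwise_cons.1 hp).1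
          have hptail : List.Pairwise (· ≤ ·) tail := hp.of_cons
          have hv : 0 ≤ v := hnn v (by simp)
          have hws_len : (tail.dropWhile (· == v)).length ≤ n := by
            have h1 := List.Sublist.length_le (List.dropWhile_sublist (l := tail) (p := (· == v)))
            simp at hlen
            omega
          have hwsp : List.Pairwise (· ≤ ·) (tail.dropWhile (· == v)) :=
            hptail.sublist (List.dropWhile_sublist _)
          have hwsnn : ∀ y ∈ tail.dropWhile (· == v), 0 ≤ y := fun y hy =>
            hnn' y (List.Sublist.mem hy (List.dropWhile_sublist _))
          obtain ⟨HBws, HAws⟩ := ihn (tail.dropWhile (· == v)) hws_len hwsp hwsnn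
          have hwslt : ∀ y ∈ tail.dropWhile (· == v), v < y :=
            lt_of_mem_dropWhile v tail hptail hvtail
          have htail : tail = List.replicate (tail.takeWhile (· == v)).length v ++ tail.dropWhile (· == v) := by
            have h1 := List.takeWhile_append_dropWhile (p := (· == v)) (l := tail)
            rw [takeWhile_eq_replicate v tail] at h1
            exact h1.symm
          have hb : pvStB (v :: tail) := by
            intro prev cur t res hprev ht
            rw [pvLoopS]
            have hvp : (v == prev) = false := by
              simp only [beq_eq_false_iff_ne, ne_eq]
              have := hprev v (by simp)
              omega
            simp only [hvp, Bool.false_eq_true, if_false]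
            rw [group_cons]
            show pvLoopS tail v cur t (pvDfsS tail (cur ++ [v]) (t - v) res)
              = pvKloopB (fun r c a => pvRecB (pvGroupB (tail.dropWhile (· == v))) r c a) v t cur ((tail.takeWhile (· == v)).length + 1) res
            have hdfs : pvDfsS tail (cur ++ [v]) (t - v) res
                = pvChain (pvGroupB (tail.dropWhile (· == v))) v t cur 1 (tail.takeWhile (· == v)).length res := by
              have h := dfs_run_eq_chain v (tail.dropWhile (· == v)) t cur HAws HBws hv hwslt ht
                (tail.takeWhile (· == v)).length 1 res
              rw [← htail] at h
              simpa using h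
            rw [hdfs]
            generalize hX : pvChain (pvGroupB (tail.dropWhile (· == v))) v t cur 1 (tail.takeWhile (· == v)).length res = X
            conv_lhs => rw [htail]
            rw [loopS_skip]
            rw [HBws v cur t X hwslt ht]
            rw [kloop_eq_chain, chain_peel]
            norm_num
            rw [recB_pos ht, ← hX]
          exact ⟨hb, StA_of_StB _ hnn hb⟩


-- A's indexed dfs/loop equal the suffix-list versions
lemma indexed_eq_suffix : ∀ (fuel : Nat) (cs : List Int) (i : Nat),
    (2 * (cs.length - i) ≤ fuel →
      ∀ prev cur t res, pvLoopA cs cs.length fuel prev cur t res i = pvLoopS (cs.drop i) prev cur t res) ∧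
    (2 * (cs.length - i) + 1 ≤ fuel →
      ∀ cur t res, pvDfsA cs cs.length fuel i cur t res = pvDfsS (cs.drop i) cur t res) := by
  intro fuel
  induction fuel with
  | zero =>
      intro cs i
      constructor
      · intro h prev cur t res
        have hi : cs.length ≤ i := by omega
        rw [pvLoopA, List.drop_eq_nil_of_le hi, pvLoopS]
      · intro h
        exact absurd h (by omega)
  | succ fuel ihn =>
      intro cs i
      constructor
      · intro hf prev cur t res
        by_cases h : i < cs.length
        · have hdrop : cs.drop i = cs[i] :: cs.drop (i + 1) := List.drop_eq_getElem_cons h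
          have hgetD : cs.getD i 0 = cs[i] := List.getD_eq_getElem cs 0 h
          rw [pvLoopA]
          simp only [if_pos h, hgetD]
          rw [hdrop, pvLoopS]
          by_cases hbp : (cs[i] == prev) = true
          · simp only [hbp, if_true]
            exact (ihn cs (i + 1)).1 (by omega) prev cur t res
          · simp only [eq_false_of_ne_true hbp, Bool.false_eq_true, if_false]
            rw [(ihn cs (i + 1)).2 (by omega) (cur ++ [cs[i]]) (t - cs[i]) res]
            exact (ihn cs (i + 1)).1 (by omega) cs[i] cur t _
        · rw [pvLoopA]
          simp only [if_neg h]
          rw [List.drop_eq_nil_of_le (by omega), pvLoopS]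
      · intro hf cur t res
        rw [pvDfsA, pvDfsS]
        by_cases htle : t ≤ 0
        · simp [htle]
        · simp only [if_neg htle]
          exact (ihn cs i).1 (by omega) (-1) cur t _

-- ===== VERDICT (by name: the statement is the Claim_ definition above) =====
theorem combinationSum2_spec : Claim_equal_combinationSum2 := by
  intro candidates target _ hpre
  unfold Spec_combinationSum2 combinationSum2 combinationSum2_alt
  have h1 := (indexed_eq_suffix (2 * (PySem.List.sorted candidates (fun x => x) false).length + 1)
    (PySem.List.sorted candidates (fun x => x) false) 0).2 (by omega) [] target []
  rw [List.drop_zero] at h1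
  simp only []
  rw [h1]
  have hpair : List.Pairwise (· ≤ ·) (PySem.List.sorted candidates (fun x => x) false) :=
    PySem.List.sorted_pairwise candidates (fun x => x)
  have hnn : ∀ y ∈ PySem.List.sorted candidates (fun x => x) false, 0 ≤ y := fun y hy =>
    hpre y ((PySem.List.mem_sorted _ _ _ _).1 hy)
  exact (main_induction (PySem.List.sorted candidates (fun x => x) false).length _ le_rfl hpair hnn).2 [] target []
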